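-- pv_equiv track=rewrite | github.com/pypi-data/pypi-mirror-25 | packages/vecvis/vecvis-1.0.tar.gz/vecvis-1.0/vecvis/utils/utils.py | calculate_vectors_min_max
-- ===== SOURCE A (Python) =====
-- def calculate_vectors_min_max(vectors):
--     """ Calculates the min an max value per dimensions """
--     if not vectors:
--         return None
--     dimensions = len(next(iter(vectors)))
--     ret = []
--     for i in range(dimensions):
--         min_value = next(iter(vectors))[i]
--         max_value = min_value
--         for vector in vectors:
--             min_value = min(min_value, vector[i])
--             max_value = max(max_value, vector[i])
--         ret.append((min_value, max_value))
--     return ret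
-- ===== SOURCE B (Python) =====
-- def calculate_vectors_min_max(vectors):
--     """ Calculates the min an max value per dimensions """
--     if not vectors:
--         return None
--     it = iter(vectors)
--     acc = [(x, x) for x in next(it)]
--     for v in it:
--         acc = [(min(lo, v[i]), max(hi, v[i])) for i, (lo, hi) in enumerate(acc)]
--     return acc
-- ===== Notes on version B (the rewrite author's own statement) =====
-- stated objective: alternative
-- what changed: B makes a single vector-outer pass: it seeds a running list of (min,max) pairs from the first vector and merges each subsequent vector into it, instead of A's dimension-outer loop that rescans the whole collection (and restarts an iterator) once per dimension.
import Mathlib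
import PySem

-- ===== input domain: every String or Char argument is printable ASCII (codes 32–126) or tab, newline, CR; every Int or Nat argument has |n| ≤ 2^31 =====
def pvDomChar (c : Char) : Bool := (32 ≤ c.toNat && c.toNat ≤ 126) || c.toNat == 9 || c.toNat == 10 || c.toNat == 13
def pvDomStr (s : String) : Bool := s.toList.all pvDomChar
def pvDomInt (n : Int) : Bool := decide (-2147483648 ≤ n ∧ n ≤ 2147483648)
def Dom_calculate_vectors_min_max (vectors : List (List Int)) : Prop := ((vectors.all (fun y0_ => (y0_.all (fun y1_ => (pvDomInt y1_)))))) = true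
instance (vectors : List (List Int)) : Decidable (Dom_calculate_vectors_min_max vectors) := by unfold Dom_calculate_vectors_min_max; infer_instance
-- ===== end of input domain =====

-- B replaces A's dimension-outer loop (one full rescan of the collection per
-- dimension) with a single vector-outer pass that merges each vector into a
-- running list of (min, max) pairs seeded from the first vector (objective: alternative).

-- ===== PORT A =====
def calculate_vectors_min_max (vectors : List (List Int)) : Option (List (Int × Int)) :=
  match vectors with
  | [] => none
  | first :: _ =>
    some ((PySem.List.pyRange 0 (first.length : Int) 1).foldl (fun ret i =>
      let m0 := PySem.List.pyGetD first i 0       -- next(iter(vectors))[i]; in range for i < len(first)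
      let p := vectors.foldl (fun (p : Int × Int) v =>
        (min p.1 (PySem.List.pyGetD v i 0), max p.2 (PySem.List.pyGetD v i 0))) (m0, m0)
      ret ++ [p]) [])

-- ===== PORT B =====
-- acc = [(x, x) for x in first]; for v in rest: acc = [(min(lo,v[i]), max(hi,v[i])) for i,(lo,hi) in enumerate(acc)]
-- enumerate-comprehension ported as mapIdx; v[i] (a nonnegative index, in range on Pre_) as v.getD i 0
def calculate_vectors_min_max_alt (vectors : List (List Int)) : Option (List (Int × Int)) :=
  match vectors with
  | [] => none
  | first :: rest =>
    some (rest.foldl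
      (fun acc v => acc.mapIdx (fun i p => (min p.1 (v.getD i 0), max p.2 (v.getD i 0))))
      (first.map (fun x => (x, x))))

-- ===== PRECONDITION & SPEC =====
-- Pre_ excludes exactly the inputs where A raises IndexError: some vector shorter
-- than the first one (A indexes every vector up to the first vector's length).
def Pre_calculate_vectors_min_max (vectors : List (List Int)) : Prop :=
  ∀ v ∈ vectors, (vectors.headD []).length ≤ v.length
instance (vectors : List (List Int)) : Decidable (Pre_calculate_vectors_min_max vectors) := by unfold Pre_calculate_vectors_min_max; infer_instance

def pvWitness_calculate_vectors_min_max : List (List Int) := [[2, 1], [0, 9], [4, -3]]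

def Spec_calculate_vectors_min_max (vectors : List (List Int)) (out : Option (List (Int × Int))) : Prop := out = calculate_vectors_min_max_alt vectors
instance (vectors : List (List Int)) (out : Option (List (Int × Int))) : Decidable (Spec_calculate_vectors_min_max vectors out) := by unfold Spec_calculate_vectors_min_max; infer_instance

-- ===== CLAIM (what is proved, stated in full; the proofs are below) =====
def Claim_equal_calculate_vectors_min_max : Prop := ∀ (vectors : List (List Int)), Dom_calculate_vectors_min_max vectors → Pre_calculate_vectors_min_max vectors → Spec_calculate_vectors_min_max vectors (calculate_vectors_min_max vectors)

-- ===== LEMMAS AND PROOFS =====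

-- B's vector-outer fold of per-index merges equals a per-index fold (the loops commute)
lemma foldB_eq (vs : List (List Int)) (acc : List (Int × Int)) :
    vs.foldl (fun acc v => acc.mapIdx (fun i p => (min p.1 (v.getD i 0), max p.2 (v.getD i 0)))) acc
    = acc.mapIdx (fun i p =>
        vs.foldl (fun (q : Int × Int) v => (min q.1 (v.getD i 0), max q.2 (v.getD i 0))) p) := by
  induction vs generalizing acc with
  | nil => apply List.ext_getElem <;> simp
  | cons v vs ih =>
    simp only [List.foldl_cons]
    rw [ih, List.mapIdx_mapIdx]
    simp [Function.comp_def]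

-- ===== VERDICT =====
theorem calculate_vectors_min_max_spec : Claim_equal_calculate_vectors_min_max := by
  intro vectors _ hpre
  unfold Spec_calculate_vectors_min_max
  match vectors with
  | [] => rfl
  | first :: rest =>
    simp only [calculate_vectors_min_max, calculate_vectors_min_max_alt]
    rw [foldB_eq, PySem.List.pyRange_zero_nat, PySem.List.foldl_append_singleton_eq_map,
        List.map_map]
    congr 1
    apply List.ext_getElem (by simp)
    intro i hi _
    simp only [List.nil_append, List.length_map, List.length_range] at hi
    simp only [List.nil_append, List.getElem_map, List.getElem_range, Function.comp_apply,
      List.getElem_mapIdx, PySem.List.pyGetD_natCast]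
    rw [PySem.List.foldl_prod_mk (f := fun (a : Int) (v : List Int) => min a (List.getD v i 0))
        (g := fun (a : Int) (v : List Int) => max a (List.getD v i 0))]
    rw [PySem.List.foldl_prod_mk (f := fun (a : Int) (v : List Int) => min a (List.getD v i 0))
        (g := fun (a : Int) (v : List Int) => max a (List.getD v i 0))]
    simp [List.foldl_cons, List.getD_eq_getElem?_getD, List.getElem?_eq_getElem hi, min_self, max_self]
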